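-- pv_equiv track=rewrite | github.com/robcarver17/pysystemtrade | syscore/genutils.py | group_dict_from_natural
-- ===== SOURCE A (Python) =====
-- from copy import copy
--
-- def group_dict_from_natural(dict_group):
--     """
--     If we're passed a natural grouping dict (eg dict(bonds=["US10", "KR3", "DE10"], equity=["SP500"]))
--     Returns the dict optimised for algo eg dict(US10=["KR3", "DE10"], SP500=[], ..)
--
--     :param dict_group: dictionary of groupings
--     :type dict_group: dict
--
--     :returns: dict
--
--
--     >>> a=dict(bonds=["US10", "KR3", "DE10"], equity=["SP500"])
--     >>> group_dict_from_natural(a)['KR3']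
--     ['US10', 'DE10']
--     """
--     if len(dict_group) == 0:
--         return dict()
--
--     all_names = sorted(
--         set(sum([dict_group[groupname] for groupname in dict_group.keys()], []))
--     )
--
--     def _return_without(name, group):
--         if name in group:
--             g2 = copy(group)
--             g2.remove(name)
--             return g2
--         else:
--             return None
--
--     def _return_group(name, dict_group):
--         ans = [
--             _return_without(name, dict_group[groupname])
--             for groupname in dict_group.keys()
--         ]
--         ans = [x for x in ans if x is not None]
--         if len(ans) == 0:
--             return []
--
--         ans = ans[0]
--         return ans
--
--     gdict = dict([(name, _return_group(name, dict_group)) for name in all_names])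
--
--     return gdict
-- ===== SOURCE B (Python) =====
-- def group_dict_from_natural(dict_group):
--     # Single pass over the groups: assign each name its first containing group
--     # (minus the name's first occurrence), then emit names in sorted order.
--     assigned = {}
--     for members in dict_group.values():
--         for name in members:
--             if name not in assigned:
--                 rest = list(members)
--                 rest.remove(name)
--                 assigned[name] = rest
--     return {name: assigned[name] for name in sorted(assigned)}
-- ===== Notes on version B (the rewrite author's own statement) =====
-- stated objective: faster
-- what changed: Instead of rescanning every group for every distinct name (with a full concat+set+sort to collect names), B makes one pass over the groups assigning each name its first containing group on first sight, then emits the names in sorted order.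
import Mathlib
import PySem

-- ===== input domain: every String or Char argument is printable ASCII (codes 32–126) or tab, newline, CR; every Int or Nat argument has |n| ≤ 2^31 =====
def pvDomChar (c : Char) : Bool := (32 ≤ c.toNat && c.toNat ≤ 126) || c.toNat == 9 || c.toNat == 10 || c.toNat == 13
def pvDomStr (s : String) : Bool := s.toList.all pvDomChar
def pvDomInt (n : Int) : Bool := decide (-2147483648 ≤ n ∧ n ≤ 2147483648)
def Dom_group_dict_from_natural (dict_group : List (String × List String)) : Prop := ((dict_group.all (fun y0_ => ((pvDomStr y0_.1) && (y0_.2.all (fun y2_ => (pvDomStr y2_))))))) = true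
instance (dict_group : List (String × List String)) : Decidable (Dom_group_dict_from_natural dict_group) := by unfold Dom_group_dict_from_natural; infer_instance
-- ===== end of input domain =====

-- B replaces A's per-name rescan of all groups by a single first-occurrence pass over the groups; proved equal on assoc lists with distinct keys.


-- ===== PORT A =====
-- `_return_without(name, group)`: if name in group, a copy with the first occurrence removed
-- (remove? is some under the guard, so getD [] is exact), else None
def pvReturnWithout (name : String) (group : List String) : Option (List String) :=
  if name ∈ group then some ((PySem.List.remove? group name).getD []) else none

-- `_return_group(name, dict_group)`
def pvReturnGroup (name : String) (d : PySem.Dict String (List String)) : List String :=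
  let ans := d.keys.map (fun groupname => pvReturnWithout name (d.getD groupname []))
  let ans := ans.filterMap id
  match ans with
  | [] => []
  | a :: _ => a

def group_dict_from_natural (dict_group : List (String × List String)) : List (String × List String) :=
  let d : PySem.Dict String (List String) := PySem.Dict.mk dict_group
  if d.size = 0 then []
  else
    -- sorted(set(sum([dict_group[g] for g in dict_group.keys()], [])))
    let all_names :=
      PySem.List.sorted
        (PySem.Set.ofList ((d.keys.map (fun groupname => d.getD groupname [])).foldl (· ++ ·) []))
        (fun x => x) false
    -- dict([(name, _return_group(name, dict_group)) for name in all_names]): all_names is a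
    -- sorted set, hence has no duplicate keys, so that dict's items are exactly this pair list
    all_names.map (fun name => (name, pvReturnGroup name d))

-- ===== PORT B =====
-- inner loop: 'for name in members: if name not in assigned: rest = list(members); rest.remove(name); assigned[name] = rest'
-- (remove? is some under the 'name in members' iteration, so getD [] is exact)
def pvAssignGroup (assigned : PySem.Dict String (List String)) (members : List String) :
    PySem.Dict String (List String) :=
  members.foldl
    (fun d name =>
      if d.contains name then d
      else d.insert name ((PySem.List.remove? members name).getD [])) assigned

def group_dict_from_natural_alt (dict_group : List (String × List String)) : List (String × List String) :=
  let assigned := (dict_group.map (·.2)).foldl pvAssignGroup PySem.Dict.empty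
  -- {name: assigned[name] for name in sorted(assigned)}: the sorted keys are distinct,
  -- so the comprehension's dict has exactly these items
  (PySem.List.sorted assigned.keys (fun x => x) false).map (fun name => (name, assigned.getD name []))

-- ===== PRECONDITION & SPEC =====
-- Pre_ excludes association lists with duplicate keys: those do not represent a Python dict
-- (Python collapses them, keeping only the last value per key), so neither port's
-- entry-by-entry reading of such a list is what the Python function sees.
def Pre_group_dict_from_natural (dict_group : List (String × List String)) : Prop :=
  (dict_group.map (·.1)).Nodup
instance (dict_group : List (String × List String)) : Decidable (Pre_group_dict_from_natural dict_group) := by unfold Pre_group_dict_from_natural; infer_instance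

def pvWitness_group_dict_from_natural : (List (String × List String)) :=
  [("bonds", ["US10", "KR3", "DE10"]), ("equity", ["SP500"])]

def Spec_group_dict_from_natural (dict_group : List (String × List String)) (out : List (String × List String)) : Prop := out = group_dict_from_natural_alt dict_group
instance (dict_group : List (String × List String)) (out : List (String × List String)) : Decidable (Spec_group_dict_from_natural dict_group out) := by unfold Spec_group_dict_from_natural; infer_instance

-- ===== CLAIM (what is proved, stated in full; the proofs are below) =====
def Claim_equal_group_dict_from_natural : Prop := ∀ (dict_group : List (String × List String)), Dom_group_dict_from_natural dict_group → Pre_group_dict_from_natural dict_group → Spec_group_dict_from_natural dict_group (group_dict_from_natural dict_group)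

-- ===== LEMMAS AND PROOFS =====

-- the value both sides compute for a name: the first group containing it, minus its first occurrence
def pvFirst (n : String) (vs : List (List String)) : List String :=
  match vs.find? (fun g => decide (n ∈ g)) with
  | some g => (PySem.List.remove? g n).getD []
  | none => []

theorem pvAssign_contains (ms : List String) (full : List String) (d : PySem.Dict String (List String)) (n : String) :
    (ms.foldl (fun d name => if d.contains name then d
        else d.insert name ((PySem.List.remove? full name).getD [])) d).contains n
      = (d.contains n || decide (n ∈ ms)) := by
  induction ms generalizing d with
  | nil => simp
  | cons m rest ih =>
    simp only [List.foldl_cons, ih]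
    by_cases hn : n = m
    · by_cases hc : d.contains m = true
      · simp [hc, hn]
      · simp [hc, hn, PySem.Dict.contains_insert_self]
    · by_cases hc : d.contains m = true
      · simp [hc, hn]
      · simp only [hc, Bool.false_eq_true, if_false, PySem.Dict.contains_insert]
        have hb : (n == m) = false := beq_eq_false_iff_ne.mpr hn
        rw [hb]
        simp [hn]

theorem pvAssign_getD (ms : List String) (full : List String) (d : PySem.Dict String (List String)) (n : String) :
    (ms.foldl (fun d name => if d.contains name then d
        else d.insert name ((PySem.List.remove? full name).getD [])) d).getD n []
      = if d.contains n then d.getD n []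
        else if n ∈ ms then (PySem.List.remove? full n).getD [] else d.getD n [] := by
  induction ms generalizing d with
  | nil => simp
  | cons m rest ih =>
    simp only [List.foldl_cons, ih]
    by_cases hc : d.contains m = true
    · by_cases hn : n = m
      · simp [hc, hn]
      · simp [hc, hn]
    · simp only [hc, Bool.false_eq_true, if_false]
      by_cases hn : n = m
      · subst hn
        simp [PySem.Dict.contains_insert_self, PySem.Dict.getD_insert_self, hc]
      · rw [PySem.Dict.getD_insert_of_ne _ _ _ hn, PySem.Dict.contains_insert]
        simp [hn, beq_iff_eq]

theorem pvAssign_keys (ms : List String) (full : List String) (d : PySem.Dict String (List String)) :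
    (ms.foldl (fun d name => if d.contains name then d
        else d.insert name ((PySem.List.remove? full name).getD [])) d).keys
      = PySem.Set.update d.keys ms := by
  induction ms generalizing d with
  | nil => simp [PySem.Set.update]
  | cons m rest ih =>
    simp only [List.foldl_cons, ih, PySem.Set.update]
    congr 1
    by_cases hc : d.contains m = true
    · simp [hc, PySem.Set.add, PySem.Set.contains,
        (PySem.Dict.contains_iff_mem_keys _ _).mp hc]
    · have hm : m ∉ d.keys := fun h => hc ((PySem.Dict.contains_iff_mem_keys _ _).mpr h)
      simp [hc, PySem.Dict.keys_insert_of_not_contains _ _ (by simpa using hc),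
        PySem.Set.add, PySem.Set.contains, hm]

theorem pvOuter_getD (vs : List (List String)) (d : PySem.Dict String (List String)) (n : String) :
    (vs.foldl pvAssignGroup d).getD n []
      = if d.contains n then d.getD n [] else pvFirst n vs := by
  induction vs generalizing d with
  | nil =>
    simp only [List.foldl_nil, pvFirst, List.find?_nil]
    by_cases hc : d.contains n = true
    · simp [hc]
    · simp [hc, PySem.Dict.getD_of_not_contains _ _ (by simpa using hc)]
  | cons g rest ih =>
    simp only [List.foldl_cons, ih, pvAssignGroup, pvAssign_getD, pvAssign_contains]
    by_cases hc : d.contains n = true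
    · simp [hc]
    · by_cases hg : n ∈ g
      · simp [hc, hg, pvFirst]
      · simp [hc, hg, pvFirst]

theorem pvOuter_keys (vs : List (List String)) (d : PySem.Dict String (List String)) :
    (vs.foldl pvAssignGroup d).keys = PySem.Set.update d.keys vs.flatten := by
  induction vs generalizing d with
  | nil => simp [PySem.Set.update]
  | cons g rest ih =>
    simp only [List.foldl_cons, ih, List.flatten_cons, pvAssignGroup, pvAssign_keys,
      PySem.Set.update, List.foldl_append]

theorem pvHead_filterMap (n : String) (vs : List (List String)) :
    (match (vs.map (fun g => pvReturnWithout n g)).filterMap id with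
     | [] => ([] : List String)
     | a :: _ => a) = pvFirst n vs := by
  induction vs with
  | nil => simp [pvFirst]
  | cons g rest ih =>
    simp only [List.map_cons, List.filterMap_cons, pvReturnWithout, pvFirst, List.find?_cons]
    by_cases hg : n ∈ g
    · simp [hg]
    · simp only [hg, if_false, id]
      simpa [pvFirst] using ih

theorem pvMapKeys {β : Type} (dg : List (String × List String)) (hnd : (dg.map (·.1)).Nodup)
    (f : List String → β) :
    (PySem.Dict.mk dg).keys.map (fun k => f ((PySem.Dict.mk dg).getD k [])) = dg.map (fun p => f p.2) := by
  have hk : (PySem.Dict.mk dg).keys = dg.map (·.1) := rfl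
  rw [hk, List.map_map]
  refine List.map_congr_left (fun p hp => ?_)
  have : (PySem.Dict.mk dg).getD p.1 [] = p.2 :=
    PySem.Dict.getD_of_mem_items _ (by exact hp) (by simpa using hnd) _
  simp [this]

theorem main_eq (dg : List (String × List String)) (hnd : (dg.map (·.1)).Nodup) :
    group_dict_from_natural dg = group_dict_from_natural_alt dg := by
  rcases eq_or_ne dg [] with h | h
  · subst h; rfl
  · unfold group_dict_from_natural group_dict_from_natural_alt
    have hsz : (PySem.Dict.mk dg).size ≠ 0 := by
      simpa [PySem.Dict.size, List.length_eq_zero_iff] using h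
    simp only [hsz, if_false]
    have hpool : ((PySem.Dict.mk dg).keys.map (fun g => (PySem.Dict.mk dg).getD g [])).foldl (· ++ ·) []
        = (dg.map (·.2)).flatten := by
      rw [pvMapKeys dg hnd (fun v => v), PySem.List.foldl_append_eq_flatten]
      simp
    have hkeys : ((dg.map (·.2)).foldl pvAssignGroup PySem.Dict.empty).keys
        = PySem.Set.ofList ((dg.map (·.2)).flatten) := by
      rw [pvOuter_keys]
      rfl
    rw [hpool, hkeys]
    refine List.map_congr_left (fun n _ => ?_)
    have hA : pvReturnGroup n (PySem.Dict.mk dg) = pvFirst n (dg.map (·.2)) := by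
      unfold pvReturnGroup
      rw [pvMapKeys dg hnd (fun v => pvReturnWithout n v)]
      simpa using pvHead_filterMap n (dg.map (·.2))
    have hB : ((dg.map (·.2)).foldl pvAssignGroup PySem.Dict.empty).getD n []
        = pvFirst n (dg.map (·.2)) := by
      rw [pvOuter_getD]
      simp
    rw [hA, hB]

-- ===== VERDICT (by name: the statement is the Claim_ definition above) =====
theorem group_dict_from_natural_spec : Claim_equal_group_dict_from_natural := by
  intro dict_group _ hpre
  exact main_eq dict_group hpre
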